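-- pv_equiv track=rewrite | github.com/DorianPRJ7/IA-ChessQuito | ChessQuitto/Tests_IA_vs_IA/utilitaires.py | penalite_proximite
-- ===== SOURCE A (Python) =====
-- def positions_pieces(jeu, couleur):
--     positions = []
--     for i in range(4):
--         for j in range(4):
--             piece=jeu[i][j]
--             if (piece!='.') and (piece[0]==couleur):
--                 positions+=[(i,j)]
--     return positions
--
-- def penalite_proximite(jeu, couleur):
--     penalite = 0
--     if(couleur=='B'):
--         ennemis = positions_pieces(jeu, 'N')
--     else:
--         ennemis = positions_pieces(jeu, 'B')
--     allies  = positions_pieces(jeu, couleur)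
--     for pos1 in allies:
--         i1=pos1[0]
--         j1=pos1[1]
--         for pos2 in ennemis:
--             i2=pos2[0]
--             j2=pos2[1]
--             if max(abs(i1-i2), abs(j1-j2)) == 1:
--                 penalite += 3
--
--     return penalite
-- ===== SOURCE B (Python) =====
-- def penalite_proximite(jeu, couleur):
--     ennemi = 'N' if couleur == 'B' else 'B'
--     total = 0
--     for i in range(4):
--         for j in range(4):
--             piece = jeu[i][j]
--             if piece != '.' and piece[0] == couleur:
--                 for di in (-1, 0, 1):
--                     for dj in (-1, 0, 1):
--                         if di == 0 and dj == 0: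
--                             continue
--                         ni = i + di
--                         nj = j + dj
--                         if 0 <= ni < 4 and 0 <= nj < 4:
--                             voisin = jeu[ni][nj]
--                             if voisin != '.' and voisin[0] == ennemi:
--                                 total += 3
--     return total
-- ===== Notes on version B (the rewrite author's own statement) =====
-- stated objective: simpler
-- what changed: Instead of materialising two position lists and comparing every ally against every enemy by Chebyshev distance, B makes one scan of the 16 cells and, at each allied piece, probes its eight in-bounds neighbour cells directly, adding 3 per enemy neighbour.
import Mathlib
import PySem

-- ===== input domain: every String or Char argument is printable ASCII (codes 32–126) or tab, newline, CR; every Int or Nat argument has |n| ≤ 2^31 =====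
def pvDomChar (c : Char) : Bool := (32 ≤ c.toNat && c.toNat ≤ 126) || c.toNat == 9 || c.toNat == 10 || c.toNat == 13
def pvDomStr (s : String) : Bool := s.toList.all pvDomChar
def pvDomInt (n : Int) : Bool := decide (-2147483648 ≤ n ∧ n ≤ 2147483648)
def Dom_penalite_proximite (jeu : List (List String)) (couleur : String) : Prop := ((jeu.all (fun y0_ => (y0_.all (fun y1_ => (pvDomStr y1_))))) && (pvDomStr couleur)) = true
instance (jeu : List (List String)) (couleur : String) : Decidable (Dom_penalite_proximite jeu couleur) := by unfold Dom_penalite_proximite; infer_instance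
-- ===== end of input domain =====

-- B replaces A's two position lists and all-pairs Chebyshev test by a single board
-- scan probing each ally's eight neighbour cells (objective: simpler).

-- jeu[i][j] (defaults only fire outside Pre_, where Python raises IndexError)
def pvCell (jeu : List (List String)) (i j : Int) : String :=
  (PySem.List.pyGet? ((PySem.List.pyGet? jeu i).getD []) j).getD ""

-- piece[0] as a 1-character string (default fires only for "" , excluded by Pre_)
def pvFirst (s : String) : String :=
  match PySem.Str.pyGet? s 0 with
  | some c => String.ofList [c]
  | none => ""

-- Python's test: piece != '.' and piece[0] == couleur
def pvEstPiece (piece couleur : String) : Bool :=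
  (piece != ".") && (pvFirst piece == couleur)

-- ===== PORT A =====
def positions_pieces (jeu : List (List String)) (couleur : String) : List (Int × Int) :=
  (PySem.List.pyRange 0 4 1).foldl (fun acc i =>
    (PySem.List.pyRange 0 4 1).foldl (fun acc2 j =>
      if pvEstPiece (pvCell jeu i j) couleur then acc2 ++ [(i, j)] else acc2) acc) []

def penalite_proximite (jeu : List (List String)) (couleur : String) : Int :=
  let ennemis := if couleur == "B" then positions_pieces jeu "N" else positions_pieces jeu "B"
  let allies := positions_pieces jeu couleur
  allies.foldl (fun pen pos1 =>
    ennemis.foldl (fun pen2 pos2 =>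
      if max |pos1.1 - pos2.1| |pos1.2 - pos2.2| = (1 : Int) then pen2 + 3 else pen2) pen) 0

-- ===== PORT B =====
def penalite_proximite_alt (jeu : List (List String)) (couleur : String) : Int :=
  let ennemi := if couleur == "B" then "N" else "B"
  (PySem.List.pyRange 0 4 1).foldl (fun tot i =>
    (PySem.List.pyRange 0 4 1).foldl (fun tot2 j =>
      if pvEstPiece (pvCell jeu i j) couleur then
        ([-1, 0, 1] : List Int).foldl (fun t di =>
          ([-1, 0, 1] : List Int).foldl (fun t2 dj =>
            if di = 0 ∧ dj = 0 then t2
            else if 0 ≤ i + di ∧ i + di < 4 ∧ 0 ≤ j + dj ∧ j + dj < 4 then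
              (if pvEstPiece (pvCell jeu (i + di) (j + dj)) ennemi then t2 + 3 else t2)
            else t2) t) tot2
      else tot2) tot) 0

-- ===== PRECONDITION & SPEC =====
-- Pre_ excludes exactly the inputs where the Python raises IndexError: boards with
-- fewer than 4 rows, a short row among the first 4, or an empty string '' in the
-- first 4x4 cells (''[0] raises).
def Pre_penalite_proximite (jeu : List (List String)) (couleur : String) : Prop :=
  4 ≤ jeu.length ∧ ∀ row ∈ jeu.take 4, 4 ≤ row.length ∧ ∀ s ∈ row.take 4, s ≠ ""
instance (jeu : List (List String)) (couleur : String) : Decidable (Pre_penalite_proximite jeu couleur) := by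
  unfold Pre_penalite_proximite; infer_instance

def pvWitness_penalite_proximite : List (List String) × String :=
  ([["BP", ".", ".", "."], [".", "NP", ".", "."], [".", ".", ".", "."], [".", ".", ".", "NT"]], "B")

def Spec_penalite_proximite (jeu : List (List String)) (couleur : String) (out : Int) : Prop := out = penalite_proximite_alt jeu couleur
instance (jeu : List (List String)) (couleur : String) (out : Int) : Decidable (Spec_penalite_proximite jeu couleur out) := by unfold Spec_penalite_proximite; infer_instance

-- ===== CLAIM (what is proved, stated in full; the proofs are below) =====
def Claim_equal_penalite_proximite : Prop := ∀ (jeu : List (List String)) (couleur : String), Dom_penalite_proximite jeu couleur → Pre_penalite_proximite jeu couleur → Spec_penalite_proximite jeu couleur (penalite_proximite jeu couleur)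

-- ===== LEMMAS AND PROOFS =====

-- any fold whose step adds a state-independent weight is a sum
theorem pvFoldlAdd {α : Type} (l : List α) (f : Int → α → Int) (w : α → Int)
    (h : ∀ t x, f t x = t + w x) : ∀ a : Int, l.foldl f a = a + (l.map w).sum := by
  induction l with
  | nil => intro a; simp
  | cons x xs ih => intro a; simp [List.foldl_cons, h, ih, add_assoc]

-- the conditional-append loop of positions_pieces is a filter+map
theorem pvFoldlAppIf (l : List Int) (q : Int → Bool) (f : Int → Int × Int) :
    ∀ a, l.foldl (fun acc j => if q j then acc ++ [f j] else acc) a = a ++ (l.filter q).map f := by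
  induction l with
  | nil => intro a; simp
  | cons x xs ih =>
    intro a
    by_cases hx : q x <;> simp [List.foldl_cons, hx, ih]

theorem pvFoldlApp (l : List Int) (g : Int → List (Int × Int)) :
    ∀ a, l.foldl (fun acc i => acc ++ g i) a = a ++ l.flatMap g := by
  induction l with
  | nil => intro a; simp
  | cons x xs ih => intro a; simp [List.foldl_cons, ih]

theorem pvSumMapFilter {α : Type} (l : List α) (q : α → Bool) (g : α → Int) :
    ((l.filter q).map g).sum = (l.map (fun x => if q x then g x else 0)).sum := by
  induction l with
  | nil => simp
  | cons x xs ih => by_cases hx : q x <;> simp [hx, ih]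

theorem pvSumMapFlatMap {α β : Type} (l : List α) (h : α → List β) (g : β → Int) :
    (((l.flatMap h)).map g).sum = (l.map (fun i => ((h i).map g).sum)).sum := by
  induction l with
  | nil => simp
  | cons x xs ih => simp [List.flatMap_cons, ih]

def pvR4 : List Int := [0, 1, 2, 3]

theorem pvRange4 : PySem.List.pyRange 0 4 1 = pvR4 := by decide

-- closed form of A's position list
theorem pvPosEq (jeu : List (List String)) (c : String) :
    positions_pieces jeu c =
      pvR4.flatMap (fun i => (pvR4.filter (fun j => pvEstPiece (pvCell jeu i j) c)).map (fun j => (i, j))) := by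
  unfold positions_pieces
  rw [pvRange4]
  have hin : ∀ (i : Int) (a : List (Int × Int)),
      pvR4.foldl (fun acc2 j => if pvEstPiece (pvCell jeu i j) c then acc2 ++ [(i, j)] else acc2) a
        = a ++ (pvR4.filter (fun j => pvEstPiece (pvCell jeu i j) c)).map (fun j => (i, j)) := by
    intro i a
    exact pvFoldlAppIf pvR4 _ _ a
  simp only [hin]
  have := pvFoldlApp pvR4
    (fun i => (pvR4.filter (fun j => pvEstPiece (pvCell jeu i j) c)).map (fun j => (i, j))) []
  simpa using this

-- double sum over the 16 cells
def pvSum16 (F : Int → Int → Int) : Int :=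
  (pvR4.map (fun i => (pvR4.map (fun j => F i j)).sum)).sum

def pvSum9 (F : Int → Int → Int) : Int :=
  (([-1, 0, 1] : List Int).map (fun di => (([-1, 0, 1] : List Int).map (fun dj => F di dj)).sum)).sum

theorem pvSum16_congr (F G : Int → Int → Int)
    (h : ∀ i ∈ pvR4, ∀ j ∈ pvR4, F i j = G i j) : pvSum16 F = pvSum16 G := by
  unfold pvSum16
  exact congrArg List.sum (List.map_congr_left (fun i hi =>
    congrArg List.sum (List.map_congr_left (fun j hj => h i hi j hj))))

-- A's total as a double 16-cell sum
theorem pvAEq (jeu : List (List String)) (couleur enn : String)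
    (henn : (if couleur == "B" then "N" else "B") = enn) :
    penalite_proximite jeu couleur =
      pvSum16 (fun i1 j1 => if pvEstPiece (pvCell jeu i1 j1) couleur then
        pvSum16 (fun i2 j2 => if pvEstPiece (pvCell jeu i2 j2) enn then
          (if max |i1 - i2| |j1 - j2| = (1 : Int) then 3 else 0) else 0) else 0) := by
  unfold penalite_proximite
  have hE : (if couleur == "B" then positions_pieces jeu "N" else positions_pieces jeu "B")
      = positions_pieces jeu enn := by
    rw [← henn]; by_cases h : couleur == "B" <;> simp [h]
  rw [hE]
  have hInner : ∀ (t : Int) (p1 : Int × Int),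
      (positions_pieces jeu enn).foldl (fun pen2 pos2 =>
          if max |p1.1 - pos2.1| |p1.2 - pos2.2| = (1 : Int) then pen2 + 3 else pen2) t
        = t + ((positions_pieces jeu enn).map
            (fun pos2 => if max |p1.1 - pos2.1| |p1.2 - pos2.2| = (1 : Int) then (3 : Int) else 0)).sum := by
    intro t p1
    refine pvFoldlAdd _ _ _ ?_ t
    intro t2 x
    by_cases hx : max |p1.1 - x.1| |p1.2 - x.2| = (1 : Int) <;> simp [hx]
  have hOuter :
      (positions_pieces jeu couleur).foldl (fun pen pos1 =>
        (positions_pieces jeu enn).foldl (fun pen2 pos2 =>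
          if max |pos1.1 - pos2.1| |pos1.2 - pos2.2| = (1 : Int) then pen2 + 3 else pen2) pen) 0
        = 0 + ((positions_pieces jeu couleur).map (fun pos1 =>
            ((positions_pieces jeu enn).map
              (fun pos2 => if max |pos1.1 - pos2.1| |pos1.2 - pos2.2| = (1 : Int) then (3 : Int) else 0)).sum)).sum := by
    refine pvFoldlAdd _ _ _ ?_ 0
    intro t p1
    exact hInner t p1
  rw [hOuter]
  rw [pvPosEq jeu couleur, pvPosEq jeu enn]
  rw [pvSumMapFlatMap]
  unfold pvSum16
  rw [zero_add]
  refine congrArg List.sum (List.map_congr_left ?_)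
  intro i1 _
  rw [List.map_map, pvSumMapFilter]
  refine congrArg List.sum (List.map_congr_left ?_)
  intro j1 _
  simp only [Function.comp_apply]
  by_cases h1 : pvEstPiece (pvCell jeu i1 j1) couleur
  · simp only [h1, if_true]
    rw [pvSumMapFlatMap]
    refine congrArg List.sum (List.map_congr_left ?_)
    intro i2 _
    rw [List.map_map, pvSumMapFilter]
    simp [Function.comp_apply]
  · simp [h1]

-- B's total as a 16-cell sum of neighbour sums
theorem pvBEq (jeu : List (List String)) (couleur enn : String)
    (henn : (if couleur == "B" then "N" else "B") = enn) :
    penalite_proximite_alt jeu couleur =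
      pvSum16 (fun i j => if pvEstPiece (pvCell jeu i j) couleur then
        pvSum9 (fun di dj =>
          if di = 0 ∧ dj = 0 then 0
          else if 0 ≤ i + di ∧ i + di < 4 ∧ 0 ≤ j + dj ∧ j + dj < 4 then
            (if pvEstPiece (pvCell jeu (i + di) (j + dj)) enn then (3 : Int) else 0)
          else 0) else 0) := by
  unfold penalite_proximite_alt
  rw [henn, pvRange4]
  have hdj : ∀ (i j di t : Int),
      ([-1, 0, 1] : List Int).foldl (fun t2 dj =>
          if di = 0 ∧ dj = 0 then t2
          else if 0 ≤ i + di ∧ i + di < 4 ∧ 0 ≤ j + dj ∧ j + dj < 4 then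
            (if pvEstPiece (pvCell jeu (i + di) (j + dj)) enn then t2 + 3 else t2)
          else t2) t
        = t + (([-1, 0, 1] : List Int).map (fun dj =>
            if di = 0 ∧ dj = 0 then 0
            else if 0 ≤ i + di ∧ i + di < 4 ∧ 0 ≤ j + dj ∧ j + dj < 4 then
              (if pvEstPiece (pvCell jeu (i + di) (j + dj)) enn then (3 : Int) else 0)
            else 0)).sum := by
    intro i j di t
    refine pvFoldlAdd _ _ _ ?_ t
    intro t2 dj
    by_cases h0 : di = 0 ∧ dj = 0
    · simp [h0]
    · by_cases hb : 0 ≤ i + di ∧ i + di < 4 ∧ 0 ≤ j + dj ∧ j + dj < 4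
      · by_cases he : pvEstPiece (pvCell jeu (i + di) (j + dj)) enn <;> simp [h0, hb, he]
      · simp [h0, hb]
  have hdi : ∀ (i j t : Int),
      ([-1, 0, 1] : List Int).foldl (fun t di =>
          ([-1, 0, 1] : List Int).foldl (fun t2 dj =>
            if di = 0 ∧ dj = 0 then t2
            else if 0 ≤ i + di ∧ i + di < 4 ∧ 0 ≤ j + dj ∧ j + dj < 4 then
              (if pvEstPiece (pvCell jeu (i + di) (j + dj)) enn then t2 + 3 else t2)
            else t2) t) t
        = t + pvSum9 (fun di dj =>
            if di = 0 ∧ dj = 0 then 0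
            else if 0 ≤ i + di ∧ i + di < 4 ∧ 0 ≤ j + dj ∧ j + dj < 4 then
              (if pvEstPiece (pvCell jeu (i + di) (j + dj)) enn then (3 : Int) else 0)
            else 0) := by
    intro i j t
    refine pvFoldlAdd _ _ _ ?_ t
    intro t2 di
    exact hdj i j di t2
  have hj : ∀ (i t : Int),
      pvR4.foldl (fun tot2 j =>
          if pvEstPiece (pvCell jeu i j) couleur then
            ([-1, 0, 1] : List Int).foldl (fun t di =>
              ([-1, 0, 1] : List Int).foldl (fun t2 dj =>
                if di = 0 ∧ dj = 0 then t2
                else if 0 ≤ i + di ∧ i + di < 4 ∧ 0 ≤ j + dj ∧ j + dj < 4 then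
                  (if pvEstPiece (pvCell jeu (i + di) (j + dj)) enn then t2 + 3 else t2)
                else t2) t) tot2
          else tot2) t
        = t + (pvR4.map (fun j => if pvEstPiece (pvCell jeu i j) couleur then
            pvSum9 (fun di dj =>
              if di = 0 ∧ dj = 0 then 0
              else if 0 ≤ i + di ∧ i + di < 4 ∧ 0 ≤ j + dj ∧ j + dj < 4 then
                (if pvEstPiece (pvCell jeu (i + di) (j + dj)) enn then (3 : Int) else 0)
              else 0) else 0)).sum := by
    intro i t
    refine pvFoldlAdd _ _ _ ?_ t
    intro t2 j
    by_cases ha : pvEstPiece (pvCell jeu i j) couleur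
    · simp only [ha, if_true]; exact hdi i j t2
    · simp [ha]
  have hfin := pvFoldlAdd pvR4 _
    (fun i => (pvR4.map (fun j => if pvEstPiece (pvCell jeu i j) couleur then
        pvSum9 (fun di dj =>
          if di = 0 ∧ dj = 0 then 0
          else if 0 ≤ i + di ∧ i + di < 4 ∧ 0 ≤ j + dj ∧ j + dj < 4 then
            (if pvEstPiece (pvCell jeu (i + di) (j + dj)) enn then (3 : Int) else 0)
          else 0) else 0)).sum)
    (fun t i => hj i t) 0
  rw [hfin, zero_add]
  rfl

-- the per-ally bijection: summing the Chebyshev-1 indicator over all 16 cells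
-- equals summing over the eight in-bounds neighbour offsets (enemy test abstract)
theorem pvCore (E : Int → Int → Bool) :
    ∀ i1 ∈ pvR4, ∀ j1 ∈ pvR4,
      pvSum16 (fun i2 j2 => if E i2 j2 then
          (if max |i1 - i2| |j1 - j2| = (1 : Int) then (3 : Int) else 0) else 0)
        = pvSum9 (fun di dj =>
            if di = 0 ∧ dj = 0 then 0
            else if 0 ≤ i1 + di ∧ i1 + di < 4 ∧ 0 ≤ j1 + dj ∧ j1 + dj < 4 then
              (if E (i1 + di) (j1 + dj) then (3 : Int) else 0)
            else 0) := by
  intro i1 hi1 j1 hj1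
  fin_cases hi1 <;> fin_cases hj1 <;>
    norm_num [pvSum16, pvSum9, pvR4]

-- ===== VERDICT (by name: the statement is the Claim_ definition above) =====
theorem penalite_proximite_spec : Claim_equal_penalite_proximite := by
  intro jeu couleur _ _
  unfold Spec_penalite_proximite
  set enn : String := if couleur == "B" then "N" else "B" with henn
  rw [pvAEq jeu couleur enn henn.symm, pvBEq jeu couleur enn henn.symm]
  refine pvSum16_congr _ _ ?_
  intro i hi j hj
  by_cases ha : pvEstPiece (pvCell jeu i j) couleur
  · simp only [ha, if_true]
    exact pvCore (fun a b => pvEstPiece (pvCell jeu a b) enn) i hi j hj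
  · simp [ha]
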